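-- pv_equiv track=rewrite | github.com/kmkurn/wassa2024 | create_span_prediction_dataset.py | _compute_span_counter
-- ===== SOURCE A (Python) =====
-- from collections import Counter, defaultdict
-- from typing import Iterable, Iterator, NamedTuple
--
-- def _compute_span_counter(spans: Iterable["Span"]) -> Counter["Span"]:
--     positions = [i for start, length in spans for i in range(start, start + length)]
--     if not positions:
--         return Counter()
--
--     min_pos, max_pos = min(positions), max(positions)
--     pos2count = Counter(positions)
--     span2count: Counter["Span"] = Counter()
--     start = min_pos
--     for end in range(min_pos + 1, max_pos + 2):
--         if pos2count[end] != pos2count[start]: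
--             assert all(pos2count[i] == pos2count[start] for i in range(start + 1, end))
--             span2count[Span(start, end - start)] = pos2count[start]
--             start = end
--     assert end == max_pos + 1 and start == end
--     return span2count
--
-- class Span(NamedTuple):
--     start: int
--     length: int
-- ===== SOURCE B (Python) =====
-- from collections import Counter
-- from typing import NamedTuple
--
--
-- class Span(NamedTuple):
--     start: int
--     length: int
--
--
-- def _compute_span_counter(spans):
--     # Sweep line: difference array over span endpoints instead of materialising
--     # every covered position.
--     delta = {}
--     for start, length in spans:
--         if length > 0:
--             delta[start] = delta.get(start, 0) + 1
--             end = start + length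
--             delta[end] = delta.get(end, 0) - 1
--     pts = sorted(p for p, d in delta.items() if d != 0)
--     result: Counter = Counter()
--     if not pts:
--         return result
--     prev = pts[0]
--     cur = delta[prev]
--     for p in pts[1:]:
--         result[Span(prev, p - prev)] = cur
--         cur += delta[p]
--         prev = p
--     return result
-- ===== Notes on version B (the rewrite author's own statement) =====
-- stated objective: faster
-- what changed: Replaces materialising every covered position and scanning the whole coordinate range with a sweep line over a difference array of sorted span endpoints, merging zero-delta points.
import Mathlib
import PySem

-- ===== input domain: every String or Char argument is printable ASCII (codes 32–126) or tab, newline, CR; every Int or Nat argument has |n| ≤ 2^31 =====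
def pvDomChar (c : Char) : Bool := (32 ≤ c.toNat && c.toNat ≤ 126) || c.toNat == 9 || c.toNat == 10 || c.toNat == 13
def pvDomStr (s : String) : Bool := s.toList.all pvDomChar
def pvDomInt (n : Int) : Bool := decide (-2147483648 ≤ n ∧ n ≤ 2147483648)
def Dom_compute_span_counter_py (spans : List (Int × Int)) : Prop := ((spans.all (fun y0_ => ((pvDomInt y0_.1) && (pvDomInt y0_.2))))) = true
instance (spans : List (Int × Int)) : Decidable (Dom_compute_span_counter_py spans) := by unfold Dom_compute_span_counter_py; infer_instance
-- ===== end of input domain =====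

-- B replaces A's scan of every covered position over the whole coordinate range by a
-- sweep line over a difference array of sorted span endpoints (objective: faster).

-- ===== PORT A =====
-- Port of _compute_span_counter.  The returned Counter keyed by Span(start, length) is the
-- association list of (start, length, count) triples in insertion order, flattened per the
-- type convention.  Each assignment uses a fresh key (start strictly increases), so the
-- Counter assignment is an append.  The two `assert` statements of A are provably always
-- true (the loop invariant makes the inner counts equal, and the final flush always fires
-- at end = max_pos + 1), so they are not modelled.
def compute_span_counter_py (spans : List (Int × Int)) : List (Int × Int × Int) :=
  let positions := spans.flatMap (fun sl => PySem.List.pyRange sl.1 (sl.1 + sl.2) 1)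
  match PySem.List.min? positions (fun x => x), PySem.List.max? positions (fun x => x) with
  | some min_pos, some max_pos =>
      -- Counter(positions): the counting fold.  pos2count is a pure lookup table (its
      -- iteration order is never observed), so it is kept as a Std.HashMap, which models
      -- Python's hash-based Counter lookups exactly (lemma pvHashCount: getD = list count)
      -- and lets the port evaluate in hash-map time as the Python does.
      let pos2count := positions.foldl
        (fun (m : Std.HashMap Int Int) p => m.insert p (m.getD p 0 + 1)) ∅
      ((PySem.List.pyRange (min_pos + 1) (max_pos + 2) 1).foldl
        (fun (st : List (Int × Int × Int) × Int) e =>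
          if pos2count.getD e 0 ≠ pos2count.getD st.2 0 then
            (st.1 ++ [(st.2, e - st.2, pos2count.getD st.2 0)], e)
          else st)
        ([], min_pos)).1
  | _, _ => []   -- `if not positions: return Counter()`

-- ===== PORT B =====
-- Port of B (sweep line).  `delta[p]` in the loop reads a key known to be present, so the
-- total lookup `getD _ 0` is exact there.
def compute_span_counter_py_alt (spans : List (Int × Int)) : List (Int × Int × Int) :=
  let delta := spans.foldl
    (fun (d : PySem.Dict Int Int) sl =>
      if 0 < sl.2 then
        let d1 := d.insert sl.1 (d.getD sl.1 0 + 1)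
        d1.insert (sl.1 + sl.2) (d1.getD (sl.1 + sl.2) 0 - 1)
      else d)
    PySem.Dict.empty
  let pts := PySem.List.sorted ((delta.items.filter (fun pd => pd.2 ≠ 0)).map (·.1))
    (fun x => x) false
  match pts with
  | [] => []
  | p0 :: rest =>
      (rest.foldl
        (fun (st : List (Int × Int × Int) × Int × Int) p =>
          (st.1 ++ [(st.2.2, p - st.2.2, st.2.1)], st.2.1 + delta.getD p 0, p))
        ([], delta.getD p0 0, p0)).1

-- ===== PRECONDITION & SPEC =====
def Spec_compute_span_counter_py (spans : List (Int × Int)) (out : List (Int × Int × Int)) : Prop := out = compute_span_counter_py_alt spans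
instance (spans : List (Int × Int)) (out : List (Int × Int × Int)) : Decidable (Spec_compute_span_counter_py spans out) := by unfold Spec_compute_span_counter_py; infer_instance

-- ===== CLAIM (what is proved, stated in full; the proofs are below) =====
def Claim_equal_compute_span_counter_py : Prop := ∀ (spans : List (Int × Int)), Dom_compute_span_counter_py spans → Spec_compute_span_counter_py spans (compute_span_counter_py spans)

-- ===== LEMMAS AND PROOFS =====

def pvRuns (f : Int → Int) (s : Int) : List Int → List (Int × Int × Int)
  | [] => []
  | e :: rest => if f e ≠ f s then (s, e - s, f s) :: pvRuns f e rest else pvRuns f s rest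

def pvSegs (f : Int → Int) (prev : Int) : List Int → List (Int × Int × Int)
  | [] => []
  | p :: rest => (prev, p - prev, f prev) :: pvSegs f p rest

theorem pvRuns_foldl (g : Int → Int) (L : List Int) : ∀ (acc : List (Int × Int × Int)) (s : Int),
    (L.foldl (fun (st : List (Int × Int × Int) × Int) e =>
      if g e ≠ g st.2 then (st.1 ++ [(st.2, e - st.2, g st.2)], e) else st) (acc, s)).1
      = acc ++ pvRuns g s L := by
  induction L with
  | nil => intro acc s; simp [pvRuns]
  | cons e rest ih =>
    intro acc s
    rw [List.foldl_cons]
    by_cases h : g e = g s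
    · rw [if_neg (not_not.mpr h)]
      rw [ih]
      simp only [pvRuns, if_neg (not_not.mpr h)]
    · rw [if_pos h]
      rw [ih]
      simp only [pvRuns, if_pos h, List.append_assoc, List.singleton_append]

theorem pvRuns_eq_segs (f : Int → Int) : ∀ (n : Nat) (a s : Int), f (a-1) = f s →
    pvRuns f s (PySem.List.pyRange a (a + n) 1)
      = pvSegs f s ((PySem.List.pyRange a (a + n) 1).filter (fun e => decide (f e ≠ f (e-1)))) := by
  intro n
  induction n with
  | zero => intro a s _; simp [PySem.List.pyRange_one_eq_nil (le_refl a), pvRuns, pvSegs]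
  | succ n ih =>
    intro a s hfa
    have hb : a + ((n+1 : Nat) : Int) = (a+1) + (n : Int) := by push_cast; ring
    have hcons : PySem.List.pyRange a (a + (n+1 : Nat)) 1 = a :: PySem.List.pyRange (a+1) ((a+1) + n) 1 := by
      rw [hb, PySem.List.pyRange_one_cons (by omega)]
    rw [hcons, List.filter_cons]
    by_cases h : f a = f s
    · have hdec : (decide (f a ≠ f (a-1))) = false := by simp [hfa, h]
      rw [hdec]
      simp only [Bool.false_eq_true, if_false, pvRuns, if_neg (not_not.mpr h)]
      exact ih (a+1) s (by simpa using h)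
    · have hdec : (decide (f a ≠ f (a-1))) = true := by simp [hfa, h]
      rw [hdec]
      simp only [if_true, pvRuns, if_pos h, pvSegs]
      exact congrArg _ (ih (a+1) a (by simp))

theorem pvFilter_pyRange_cons (P : Int → Bool) (b : Int) : ∀ (n : Nat) (a p : Int) (r : List Int),
    b - a ≤ n →
    (PySem.List.pyRange a b 1).filter P = p :: r →
    a ≤ p ∧ p < b ∧ P p = true ∧ r = (PySem.List.pyRange (p+1) b 1).filter P ∧
      (∀ q, a ≤ q → q < p → P q = false) := by
  intro n
  induction n with
  | zero =>
    intro a p r hn h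
    rw [PySem.List.pyRange_one_eq_nil (by omega)] at h
    simp at h
  | succ n ih =>
    intro a p r hn h
    by_cases hab : b ≤ a
    · rw [PySem.List.pyRange_one_eq_nil hab] at h; simp at h
    · rw [PySem.List.pyRange_one_cons (by omega), List.filter_cons] at h
      by_cases hPa : P a = true
      · rw [if_pos hPa] at h
        obtain ⟨h1, h2⟩ := List.cons.injEq .. ▸ h
        refine ⟨by omega, by omega, h1 ▸ hPa, by rw [← h1]; exact h2.symm ▸ rfl, ?_⟩
        intro q hq1 hq2; omega
      · rw [if_neg hPa] at h
        obtain ⟨g1, g2, g3, g4, g5⟩ := ih (a+1) p r (by omega) h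
        refine ⟨by omega, g2, g3, g4, ?_⟩
        intro q hq1 hq2
        rcases eq_or_lt_of_le hq1 with rfl | hlt
        · simpa using hPa
        · exact g5 q (by omega) hq2

theorem pvConst (f : Int → Int) : ∀ (k : Nat) (s : Int),
    (∀ q, s < q → q ≤ s + k → f q = f (q-1)) → f (s + k) = f s := by
  intro k
  induction k with
  | zero => intro s _; simp
  | succ k ih =>
    intro s h
    have h1 : f (s + (k+1 : Nat)) = f (s + k) := by
      have := h (s + (k+1 : Nat)) (by push_cast; omega) (by push_cast; omega)
      rw [this]; congr 1; push_cast; ring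
    rw [h1]
    exact ih s (fun q hq1 hq2 => h q hq1 (by push_cast at hq2 ⊢; omega))

theorem pvBloop (f : Int → Int) (d : PySem.Dict Int Int)
    (hd : ∀ q, d.getD q 0 = f q - f (q-1)) (b : Int) :
    ∀ (rest : List Int) (prev : Int) (acc : List (Int × Int × Int)) (cur : Int),
    cur = f prev →
    rest = (PySem.List.pyRange (prev+1) b 1).filter (fun e => decide (f e ≠ f (e-1))) →
    (rest.foldl (fun (st : List (Int × Int × Int) × Int × Int) p =>
        (st.1 ++ [(st.2.2, p - st.2.2, st.2.1)], st.2.1 + d.getD p 0, p)) (acc, cur, prev)).1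
      = acc ++ pvSegs f prev rest := by
  intro rest
  induction rest with
  | nil => intro prev acc cur _ _; simp [pvSegs]
  | cons p r ih =>
    intro prev acc cur hcur hr
    obtain ⟨g1, g2, g3, g4, g5⟩ :=
      pvFilter_pyRange_cons (fun e => decide (f e ≠ f (e-1))) b (b - (prev+1)).toNat
        (prev+1) p r (by omega) hr.symm
    -- f is constant on [prev, p-1]
    have hconst : f (p - 1) = f prev := by
      have hk : p - 1 = prev + ((p - 1 - prev).toNat : Int) := by omega
      rw [hk]
      apply pvConst
      intro q hq1 hq2
      have : (decide (f q ≠ f (q-1))) = false := g5 q (by omega) (by omega)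
      simpa using this
    have hfp : cur + d.getD p 0 = f p := by
      rw [hcur, hd p, hconst]; ring
    rw [List.foldl_cons]
    have := ih p (acc ++ [(prev, p - prev, cur)]) (cur + d.getD p 0) hfp g4
    rw [this]
    simp [pvSegs, hcur]

def pvPos (spans : List (Int × Int)) : List Int :=
  spans.flatMap (fun sl => PySem.List.pyRange sl.1 (sl.1 + sl.2) 1)

def pvF (spans : List (Int × Int)) (p : Int) : Int := ((pvPos spans).count p : Int)

def pvDeltaF (spans : List (Int × Int)) (q : Int) : Int :=
  (spans.map (fun sl => if 0 < sl.2 then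
      ((if sl.1 = q then (1:Int) else 0) - (if sl.1 + sl.2 = q then 1 else 0)) else 0)).sum

theorem pvCount_pyRange (s e p : Int) :
    ((PySem.List.pyRange s e 1).count p : Int) = if s ≤ p ∧ p < e then 1 else 0 := by
  by_cases h : s ≤ p ∧ p < e
  · rw [if_pos h, List.count_eq_one_of_mem (PySem.List.nodup_pyRange_one s e)
      (PySem.List.mem_pyRange_one.mpr h)]
    simp
  · rw [if_neg h, List.count_eq_zero.mpr (fun hm => h (PySem.List.mem_pyRange_one.mp hm))]
    simp

theorem pvF_cons (sl : Int × Int) (spans : List (Int × Int)) (p : Int) :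
    pvF (sl :: spans) p = (if sl.1 ≤ p ∧ p < sl.1 + sl.2 then 1 else 0) + pvF spans p := by
  simp only [pvF, pvPos, List.flatMap_cons, List.count_append]
  push_cast
  rw [pvCount_pyRange]

theorem pvDeltaF_eq (spans : List (Int × Int)) (q : Int) :
    pvDeltaF spans q = pvF spans q - pvF spans (q-1) := by
  induction spans with
  | nil => simp [pvDeltaF, pvF, pvPos]
  | cons sl rest ih =>
    have hterm : (if 0 < sl.2 then
        ((if sl.1 = q then (1:Int) else 0) - (if sl.1 + sl.2 = q then 1 else 0)) else 0)
        = (if sl.1 ≤ q ∧ q < sl.1 + sl.2 then 1 else 0)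
          - (if sl.1 ≤ q - 1 ∧ q - 1 < sl.1 + sl.2 then 1 else 0) := by
      split_ifs <;> omega
    simp only [pvDeltaF, List.map_cons, List.sum_cons] at *
    rw [hterm, ih, pvF_cons, pvF_cons]
    ring

theorem pvDelta_getD : ∀ (spans : List (Int × Int)) (d : PySem.Dict Int Int) (q : Int),
    (spans.foldl (fun (d : PySem.Dict Int Int) sl =>
      if 0 < sl.2 then
        let d1 := d.insert sl.1 (d.getD sl.1 0 + 1)
        d1.insert (sl.1 + sl.2) (d1.getD (sl.1 + sl.2) 0 - 1)
      else d) d).getD q 0 = d.getD q 0 + pvDeltaF spans q := by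
  intro spans
  induction spans with
  | nil => intro d q; simp [pvDeltaF]
  | cons sl rest ih =>
    intro d q
    rw [List.foldl_cons]
    by_cases h : 0 < sl.2
    · rw [if_pos h, ih]
      simp only [PySem.Dict.getD_insert, pvDeltaF, List.map_cons, List.sum_cons, if_pos h]
      have hne : sl.1 + sl.2 ≠ sl.1 := by omega
      split_ifs <;> (try subst_vars) <;> omega
    · rw [if_neg h, ih]
      simp only [pvDeltaF, List.map_cons, List.sum_cons, if_neg h]
      ring

theorem pvDelta_nodup : ∀ (spans : List (Int × Int)) (d : PySem.Dict Int Int),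
    d.keys.Nodup →
    (spans.foldl (fun (d : PySem.Dict Int Int) sl =>
      if 0 < sl.2 then
        let d1 := d.insert sl.1 (d.getD sl.1 0 + 1)
        d1.insert (sl.1 + sl.2) (d1.getD (sl.1 + sl.2) 0 - 1)
      else d) d).keys.Nodup := by
  intro spans
  induction spans with
  | nil => intro d hd; simpa
  | cons sl rest ih =>
    intro d hd
    rw [List.foldl_cons]
    by_cases h : 0 < sl.2
    · rw [if_pos h]
      exact ih _ (PySem.Dict.nodup_keys_insert _ _ _ (PySem.Dict.nodup_keys_insert _ _ _ hd))
    · rw [if_neg h]; exact ih d hd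

theorem pvHashCount : ∀ (l : List Int) (m : Std.HashMap Int Int) (q : Int),
    (l.foldl (fun (m : Std.HashMap Int Int) p => m.insert p (m.getD p 0 + 1)) m).getD q 0
      = m.getD q 0 + (l.count q : Int) := by
  intro l
  induction l with
  | nil => intro m q; simp
  | cons p rest ih =>
    intro m q
    rw [List.foldl_cons, ih, Std.HashMap.getD_insert]
    rw [List.count_cons]
    by_cases h : p = q
    · rw [if_pos (by simpa using h), if_pos (by simp [h]), h]
      push_cast; ring
    · rw [if_neg (by simpa using h), if_neg (by simpa using h)]
      push_cast; ring

theorem pvRuns_congr (f g : Int → Int) (h : ∀ x, f x = g x) :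
    ∀ (L : List Int) (s : Int), pvRuns f s L = pvRuns g s L := by
  intro L
  induction L with
  | nil => intro s; simp [pvRuns]
  | cons e rest ih =>
    intro s
    simp only [pvRuns, h]
    by_cases hc : g e = g s
    · rw [if_neg (not_not.mpr hc), if_neg (not_not.mpr hc), ih]
    · rw [if_pos hc, if_pos hc, ih]

theorem pvMem_lst (d : PySem.Dict Int Int) (hn : d.keys.Nodup) (q : Int) :
    q ∈ (d.items.filter (fun pd => pd.2 ≠ 0)).map (·.1) ↔ d.getD q 0 ≠ 0 := by
  constructor
  · intro hq
    obtain ⟨pd, hpd, rfl⟩ := List.mem_map.mp hq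
    obtain ⟨hpd1, hpd2⟩ := List.mem_filter.mp hpd
    rw [PySem.Dict.getD_of_mem_items d ((Prod.mk.eta ▸ hpd1 : (pd.1, pd.2) ∈ d.items)) hn 0]
    simpa using hpd2
  · intro hq
    by_cases hc : d.contains q = true
    · have hs : d.get? q = some (d.getD q 0) := by
        rcases ho : d.get? q with _ | v
        · rw [PySem.Dict.contains_eq_isSome_get? d q, ho] at hc; simp at hc
        · rw [PySem.Dict.getD_eq_get?_getD, ho]; rfl
      have hmem := PySem.Dict.mem_items_of_get?_eq_some d hs
      exact List.mem_map.mpr ⟨(q, d.getD q 0), List.mem_filter.mpr ⟨hmem, by simpa using hq⟩, rfl⟩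
    · exact absurd (PySem.Dict.getD_of_not_contains d 0 (by simpa using hc)) hq

theorem pv_main_eq (spans : List (Int × Int)) :
    compute_span_counter_py spans = compute_span_counter_py_alt spans := by
  -- shared notation
  have hdeltagetD : ∀ q, ((spans.foldl
      (fun (d : PySem.Dict Int Int) sl =>
        if 0 < sl.2 then
          let d1 := d.insert sl.1 (d.getD sl.1 0 + 1)
          d1.insert (sl.1 + sl.2) (d1.getD (sl.1 + sl.2) 0 - 1)
        else d) PySem.Dict.empty).getD q 0) = pvF spans q - pvF spans (q-1) := by
    intro q
    rw [pvDelta_getD, ← pvDeltaF_eq]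
    simp
  have hnodupk : ((spans.foldl
      (fun (d : PySem.Dict Int Int) sl =>
        if 0 < sl.2 then
          let d1 := d.insert sl.1 (d.getD sl.1 0 + 1)
          d1.insert (sl.1 + sl.2) (d1.getD (sl.1 + sl.2) 0 - 1)
        else d) PySem.Dict.empty).keys.Nodup) :=
    pvDelta_nodup spans _ PySem.Dict.nodup_keys_empty
  have hfzero : ∀ p : Int, p ∉ pvPos spans → pvF spans p = 0 := by
    intro p hp
    simp [pvF, List.count_eq_zero.mpr hp]
  have hfmem : ∀ p : Int, pvF spans p ≠ 0 → p ∈ pvPos spans := by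
    intro p hp
    by_contra hc
    exact hp (hfzero p hc)
  have hpos : spans.flatMap (fun sl => PySem.List.pyRange sl.1 (sl.1 + sl.2) 1) = pvPos spans := rfl
  simp only [compute_span_counter_py, compute_span_counter_py_alt]
  rw [hpos]
  rcases hmin : PySem.List.min? (pvPos spans) (fun x => x) with _ | mn <;>
    rcases hmax : PySem.List.max? (pvPos spans) (fun x => x) with _ | mx
  -- empty cases
  case none.none | none.some =>
    have hempty : pvPos spans = [] := (PySem.List.min?_eq_none_iff _ _).mp hmin
    have hlst : ((spans.foldl
        (fun (d : PySem.Dict Int Int) sl =>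
          if 0 < sl.2 then
            let d1 := d.insert sl.1 (d.getD sl.1 0 + 1)
            d1.insert (sl.1 + sl.2) (d1.getD (sl.1 + sl.2) 0 - 1)
          else d) PySem.Dict.empty).items.filter (fun pd => pd.2 ≠ 0)).map (·.1) = ([] : List Int) := by
      rw [List.map_eq_nil_iff, List.filter_eq_nil_iff]
      intro pd hpd
      have := PySem.Dict.getD_of_mem_items _ (show (pd.1, pd.2) ∈ _ by simpa using hpd) hnodupk 0
      rw [hdeltagetD] at this
      have h0 : ∀ p : Int, pvF spans p = 0 := by
        intro p; apply hfzero; rw [hempty]; simp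
      simp [h0] at this
      simp [this]
    rw [hlst]
    rfl
  case some.none =>
    rw [(PySem.List.min?_eq_none_iff (pvPos spans) (fun x => x)).mpr
      ((PySem.List.max?_eq_none_iff (pvPos spans) (fun x => x)).mp hmax)] at hmin
    cases hmin
  case some.some =>
    -- facts about min/max
    have hmnmem : mn ∈ pvPos spans := PySem.List.min?_mem hmin
    have hmnmin : ∀ y ∈ pvPos spans, mn ≤ y := PySem.List.min?_isMin hmin
    have hmxmax : ∀ y ∈ pvPos spans, y ≤ mx := PySem.List.max?_isMax hmax
    have hmnmx : mn ≤ mx := hmxmax mn hmnmem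
    have hfmn : pvF spans mn ≠ 0 := by
      simp only [pvF]
      exact_mod_cast fun h => (List.count_eq_zero.mp (by exact_mod_cast h) : mn ∉ pvPos spans) hmnmem
    have hfmn1 : pvF spans (mn - 1) = 0 := by
      apply hfzero
      intro hc
      have := hmnmin _ hc
      omega
    have hchg_bounds : ∀ q : Int, pvF spans q ≠ pvF spans (q-1) → mn ≤ q ∧ q < mx + 2 := by
      intro q hq
      by_cases h0 : pvF spans q = 0
      · have h1 : pvF spans (q-1) ≠ 0 := by rw [h0] at hq; exact fun hc => hq hc.symm
        have hm := hfmem _ h1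
        have := hmnmin _ hm
        have := hmxmax _ hm
        omega
      · have hm := hfmem _ h0
        have := hmnmin _ hm
        have := hmxmax _ hm
        omega
    set d : PySem.Dict Int Int := spans.foldl
      (fun (d : PySem.Dict Int Int) sl =>
        if 0 < sl.2 then
          let d1 := d.insert sl.1 (d.getD sl.1 0 + 1)
          d1.insert (sl.1 + sl.2) (d1.getD (sl.1 + sl.2) 0 - 1)
        else d) PySem.Dict.empty with hd
    set lst : List Int := (d.items.filter (fun pd => pd.2 ≠ 0)).map (·.1) with hlst
    set ys : List Int :=
      (PySem.List.pyRange mn (mx+2) 1).filter (fun e => decide (pvF spans e ≠ pvF spans (e-1))) with hys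
    have hysnodup : ys.Nodup := (PySem.List.nodup_pyRange_one mn (mx+2)).filter _
    have hkeys : d.keys = d.items.map (·.1) := rfl
    have hlstnodup : lst.Nodup := by
      rw [hlst]
      exact List.Nodup.sublist
        ((List.filter_sublist (l := d.items) (p := fun pd => decide (pd.2 ≠ 0))).map (·.1))
        (hkeys ▸ hnodupk)
    have hmemys : ∀ q : Int, q ∈ ys ↔ d.getD q 0 ≠ 0 := by
      intro q
      rw [hys, List.mem_filter, PySem.List.mem_pyRange_one, hdeltagetD]
      constructor
      · intro ⟨_, h2⟩
        have : pvF spans q ≠ pvF spans (q-1) := by simpa using h2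
        omega
      · intro h
        have hne : pvF spans q ≠ pvF spans (q-1) := fun hc => h (by omega)
        exact ⟨hchg_bounds q hne, by simpa using hne⟩
    have hperm : ys.Perm lst := (List.perm_ext_iff_of_nodup hysnodup hlstnodup).mpr
      (fun q => (hmemys q).trans (pvMem_lst d hnodupk q).symm)
    have hpts : PySem.List.sorted lst (fun x => x) false = ys :=
      PySem.List.sorted_eq_of_perm_of_pairwise_lt lst ys _ hperm
        ((PySem.List.pairwise_lt_pyRange_one mn (mx+2)).filter _)
    have hchgmn : (decide (pvF spans mn ≠ pvF spans (mn - 1))) = true := by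
      simp [hfmn1, hfmn]
    have hys_cons : ys = mn ::
        (PySem.List.pyRange (mn+1) (mx+2) 1).filter
          (fun e => decide (pvF spans e ≠ pvF spans (e-1))) := by
      rw [hys, PySem.List.pyRange_one_cons (by omega), List.filter_cons, if_pos hchgmn]
    rw [hpts, hys_cons]
    set H : Std.HashMap Int Int := (pvPos spans).foldl
      (fun (m : Std.HashMap Int Int) p => m.insert p (m.getD p 0 + 1)) ∅ with hH
    have hHgetD : ∀ x : Int, H.getD x 0 = pvF spans x := by
      intro x
      rw [hH, pvHashCount]
      simp [pvF]
    show (List.foldl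
        (fun (st : List (Int × Int × Int) × Int) e =>
          if H.getD e 0 ≠ H.getD st.2 0 then
            (st.1 ++ [(st.2, e - st.2, H.getD st.2 0)], e)
          else st)
        ([], mn) (PySem.List.pyRange (mn + 1) (mx + 2) 1)).1 =
      (List.foldl
        (fun (st : List (Int × Int × Int) × Int × Int) p =>
          (st.1 ++ [(st.2.2, p - st.2.2, st.2.1)], st.2.1 + d.getD p 0, p))
        ([], d.getD mn 0, mn)
        (List.filter (fun e => decide (pvF spans e ≠ pvF spans (e - 1)))
          (PySem.List.pyRange (mn + 1) (mx + 2) 1))).1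
    -- A side
    rw [pvRuns_foldl (fun e => H.getD e 0)]
    rw [List.nil_append,
      pvRuns_congr (fun e => H.getD e 0) (pvF spans) (fun x => hHgetD x)]
    -- B side
    have hcur : d.getD mn 0 = pvF spans mn := by rw [hdeltagetD, hfmn1]; ring
    rw [pvBloop (pvF spans) d hdeltagetD (mx+2) _ mn [] (d.getD mn 0) hcur rfl,
      List.nil_append]
    -- reduce A side to segs
    have hn : mx + 2 = (mn + 1) + (((mx + 1 - mn).toNat : Nat) : Int) := by omega
    rw [hn, pvRuns_eq_segs (pvF spans) ((mx + 1 - mn).toNat) (mn+1) mn (by simp)]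

-- ===== VERDICT (by name: the statement is the Claim_ definition above) =====
theorem compute_span_counter_py_spec : Claim_equal_compute_span_counter_py := by
  intro spans _
  unfold Spec_compute_span_counter_py
  exact pv_main_eq spans
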